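-- pv_equiv track=rewrite | github.com/chjung99/Algorithm_Problems | 백준/Silver/16951. 블록 놀이/블록 놀이.py | make_arr
-- ===== SOURCE A (Python) =====
-- from collections import deque
--
-- def make_arr(idx, A, K, N):
--     flag = True
--     queue = deque([A[idx]])
--     tmp = A[idx]
--     for i in range(idx):
--         tmp -= K
--         if tmp <= 0:
--             flag = False
--         queue.appendleft(tmp)
--     tmp = A[idx]
--     for i in range(idx+1, N):
--         tmp += K
--         if tmp <= 0:
--             flag = False
--         queue.append(tmp)
--     return list(queue), flag
-- ===== SOURCE B (Python) =====
-- def make_arr(idx, A, K, N):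
--     center = A[idx]
--     left = max(idx, 0)            # number of blocks below the chosen tower
--     right = max(N - idx - 1, 0)   # number of blocks above it
--     arr = [center + d * K for d in range(-left, right + 1)]
--     flag = all(center + d * K > 0 for d in range(-left, right + 1) if d != 0)
--     return arr, flag
-- ===== Notes on version B (the rewrite author's own statement) =====
-- stated objective: simpler
-- what changed: Replaces the deque and the two outward incremental-delta accumulation loops by one direct closed-form pass center + d*K over the offset range(-left, right+1), with the positivity flag computed by all() skipping offset 0.
import Mathlib
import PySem

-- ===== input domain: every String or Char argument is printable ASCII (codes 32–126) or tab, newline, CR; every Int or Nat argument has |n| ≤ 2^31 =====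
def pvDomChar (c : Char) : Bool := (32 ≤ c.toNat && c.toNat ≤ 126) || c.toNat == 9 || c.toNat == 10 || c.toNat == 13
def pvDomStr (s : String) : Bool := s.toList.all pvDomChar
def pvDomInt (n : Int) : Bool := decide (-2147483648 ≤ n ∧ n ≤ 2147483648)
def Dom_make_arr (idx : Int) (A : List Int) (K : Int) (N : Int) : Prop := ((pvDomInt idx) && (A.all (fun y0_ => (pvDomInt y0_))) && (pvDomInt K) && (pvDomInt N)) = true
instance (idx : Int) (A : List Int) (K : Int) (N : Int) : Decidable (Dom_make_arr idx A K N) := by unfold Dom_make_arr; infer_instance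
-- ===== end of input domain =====

-- B replaces A's deque and two outward incremental loops by one closed-form pass
-- arr[p] = A[idx] + (p - idx)*K plus an all() positivity check skipping idx (objective: simpler).

-- ===== PORT A =====
-- loop body of 'for i in range(idx)': tmp -= K; flag update; queue.appendleft(tmp)
def pvStepL (K : Int) (st : Int × List Int × Bool) (_ : Int) : Int × List Int × Bool :=
  let tmp := st.1 - K
  (tmp, tmp :: st.2.1, if tmp ≤ 0 then false else st.2.2)

-- loop body of 'for i in range(idx+1, N)': tmp += K; flag update; queue.append(tmp)
def pvStepR (K : Int) (st : Int × List Int × Bool) (_ : Int) : Int × List Int × Bool :=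
  let tmp := st.1 + K
  (tmp, st.2.1 ++ [tmp], if tmp ≤ 0 then false else st.2.2)

def make_arr (idx : Int) (A : List Int) (K : Int) (N : Int) : List Int × Bool :=
  match PySem.List.pyGet? A idx with
  | none => ([], true)  -- A raises IndexError here; excluded by Pre_make_arr
  | some a0 =>
    let s1 := (PySem.List.pyRange 0 idx 1).foldl (pvStepL K) (a0, [a0], true)
    let s2 := (PySem.List.pyRange (idx + 1) N 1).foldl (pvStepR K) (a0, s1.2.1, s1.2.2)
    (s2.2.1, s2.2.2)

-- ===== PORT B =====
def make_arr_alt (idx : Int) (A : List Int) (K : Int) (N : Int) : List Int × Bool :=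
  match PySem.List.pyGet? A idx with
  | none => ([], true)  -- Source B raises IndexError here too; excluded by Pre_make_arr
  | some center =>
    let left := max idx 0
    let right := max (N - idx - 1) 0
    let arr := (PySem.List.pyRange (-left) (right + 1) 1).map (fun d => center + d * K)
    let flag := ((PySem.List.pyRange (-left) (right + 1) 1).filter (fun d => d ≠ 0)).all
      (fun d => decide (0 < center + d * K))
    (arr, flag)

-- ===== PRECONDITION & SPEC =====
-- Pre_ excludes exactly the inputs where A raises IndexError on A[idx] (idx out of range).
def Pre_make_arr (idx : Int) (A : List Int) (_K : Int) (_N : Int) : Prop :=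
  PySem.Raise.InRange A.length idx
instance (idx : Int) (A : List Int) (K : Int) (N : Int) : Decidable (Pre_make_arr idx A K N) := by unfold Pre_make_arr; infer_instance

def pvWitness_make_arr : Int × List Int × Int × Int := (1, ([3, 5, 7], 2, 3))

def Spec_make_arr (idx : Int) (A : List Int) (K : Int) (N : Int) (out : List Int × Bool) : Prop := out = make_arr_alt idx A K N
instance (idx : Int) (A : List Int) (K : Int) (N : Int) (out : List Int × Bool) : Decidable (Spec_make_arr idx A K N out) := by unfold Spec_make_arr; infer_instance

-- ===== CLAIM (what is proved, stated in full; the proofs are below) =====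
def Claim_equal_make_arr : Prop := ∀ (idx : Int) (A : List Int) (K : Int) (N : Int), Dom_make_arr idx A K N → Pre_make_arr idx A K N → Spec_make_arr idx A K N (make_arr idx A K N)

-- ===== LEMMAS AND PROOFS =====

lemma pv_if_flag (tmp : Int) (f : Bool) :
    (if tmp ≤ 0 then false else f) = (f && decide (0 < tmp)) := by
  by_cases h : tmp ≤ 0
  · simp [h, not_lt.mpr h]
  · simp [h, (by omega : (0:Int) < tmp)]

lemma pv_leftLoop (K a : Int) (acc : List Int) (f : Bool) (l : List Int) :
    l.foldl (pvStepL K) (a, acc, f) =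
      (a - l.length * K,
       ((List.range l.length).map (fun t : Nat => a - ((l.length : Int) - (t : Int)) * K)) ++ acc,
       f && (List.range l.length).all (fun t => decide (0 < a - ((t : Int) + 1) * K))) := by
  induction l generalizing a acc f with
  | nil => simp [List.range_zero]
  | cons x l ih =>
    simp only [List.foldl_cons, pvStepL, List.length_cons]
    rw [pv_if_flag, ih]
    simp only [Prod.mk.injEq]
    refine ⟨?_, ?_, ?_⟩
    · push_cast; ring
    ·
      rw [List.range_succ, List.map_append]
      simp only [List.map_cons, List.map_nil, List.append_assoc, List.cons_append,
        List.nil_append]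
      congr 1
      · apply List.map_congr_left
        intro t _
        push_cast; ring
      · congr 1
        push_cast; ring
    · rw [Bool.eq_iff_iff]
      simp only [Bool.and_eq_true, List.all_eq_true, List.mem_range, decide_eq_true_eq]
      constructor
      · rintro ⟨⟨hf, h0⟩, h⟩
        refine ⟨hf, ?_⟩
        intro t ht
        rcases Nat.eq_zero_or_eq_succ_pred t with h' | h'
        · subst h'; push_cast; linarith
        · have ht' : t - 1 < l.length := by omega
          have := h (t - 1) ht'
          have hc : ((t : Int) - 1 : Int) = ((t - 1 : Nat) : Int) := by omega
          push_cast at this ⊢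
          rw [← hc] at this
          nlinarith [this]
      · rintro ⟨hf, h⟩
        refine ⟨⟨hf, ?_⟩, ?_⟩
        · have := h 0 (by omega); push_cast at this; linarith
        · intro t ht
          have := h (t + 1) (by omega)
          push_cast at this ⊢
          nlinarith [this]

lemma pv_rightLoop (K a : Int) (acc : List Int) (f : Bool) (l : List Int) :
    l.foldl (pvStepR K) (a, acc, f) =
      (a + l.length * K,
       acc ++ (List.range l.length).map (fun j : Nat => a + ((j : Int) + 1) * K),
       f && (List.range l.length).all (fun j => decide (0 < a + ((j : Int) + 1) * K))) := by
  induction l generalizing a acc f with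
  | nil => simp [List.range_zero]
  | cons x l ih =>
    simp only [List.foldl_cons, pvStepR, List.length_cons]
    rw [pv_if_flag, ih]
    simp only [Prod.mk.injEq]
    refine ⟨?_, ?_, ?_⟩
    · push_cast; ring
    · rw [List.range_succ_eq_map]
      simp only [List.map_cons, List.map_map, List.append_assoc, List.singleton_append]
      congr 2
      · push_cast; ring
      · apply List.map_congr_left
        intro j _
        simp only [Function.comp_apply]
        push_cast; ring
    · rw [Bool.eq_iff_iff]
      simp only [Bool.and_eq_true, List.all_eq_true, List.mem_range, decide_eq_true_eq]
      constructor
      · rintro ⟨⟨hf, h0⟩, h⟩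
        refine ⟨hf, ?_⟩
        intro j hj
        rcases Nat.eq_zero_or_eq_succ_pred j with h' | h'
        · subst h'; push_cast; linarith
        · have hj' : j - 1 < l.length := by omega
          have := h (j - 1) hj'
          have hc : ((j : Int) - 1 : Int) = ((j - 1 : Nat) : Int) := by omega
          push_cast at this ⊢
          rw [← hc] at this
          nlinarith [this]
      · rintro ⟨hf, h⟩
        refine ⟨⟨hf, ?_⟩, ?_⟩
        · have := h 0 (by omega); push_cast at this; linarith
        · intro j hj
          have := h (j + 1) (by omega)
          push_cast at this ⊢
          nlinarith [this]

-- ===== VERDICT (by name: the statement is the Claim_ definition above) =====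
theorem make_arr_spec : Claim_equal_make_arr := by
  intro idx A K N _ hpre
  unfold Pre_make_arr at hpre
  unfold Spec_make_arr make_arr make_arr_alt
  cases hget : PySem.List.pyGet? A idx with
  | none => exact absurd hpre ((PySem.List.pyGet?_eq_none_iff A idx).mp hget)
  | some c =>
    dsimp only
    rw [pv_leftLoop, pv_rightLoop]
    dsimp only
    simp only [PySem.List.length_pyRange_one, Bool.true_and, Prod.mk.injEq]
    have hL : max idx 0 = (((idx - 0).toNat : Int)) := by omega
    have hR : max (N - idx - 1) 0 = (((N - (idx + 1)).toNat : Int)) := by omega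
    constructor
    · rw [PySem.List.pyRange_one_append (-(max idx 0)) 0 (max (N - idx - 1) 0 + 1)
          (by omega) (by omega),
        PySem.List.pyRange_one_cons (show (0 : Int) < max (N - idx - 1) 0 + 1 by omega),
        List.map_append, List.map_cons]
      simp only [List.append_assoc, List.singleton_append]
      congr 1
      · rw [PySem.List.pyRange_one, List.map_map]
        have hn : (0 - -(max idx 0)).toNat = (idx - 0).toNat := by omega
        rw [hn]
        apply List.map_congr_left
        intro t _
        simp only [Function.comp_apply]
        rw [hL]
        ring
      · congr 1
        · ring
        · rw [PySem.List.pyRange_one, List.map_map]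
          have hn : (max (N - idx - 1) 0 + 1 - 0).toNat = (N - (idx + 1)).toNat + 1 := by omega
          have hn' : (max (N - idx - 1) 0 + 1 - (0 + 1)).toNat = (N - (idx + 1)).toNat := by omega
          rw [hn']
          apply List.map_congr_left
          intro j _
          simp only [Function.comp_apply]
          ring
    · rw [Bool.eq_iff_iff]
      simp only [Bool.and_eq_true, List.all_eq_true, List.mem_range, List.mem_filter,
        PySem.List.mem_pyRange_one, decide_eq_true_eq]
      constructor
      · rintro ⟨hLa, hRa⟩ d ⟨⟨hd1, hd2⟩, hdne⟩
        by_cases hneg : d < 0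
        · have ht : (-d - 1).toNat < (idx - 0).toNat := by omega
          have hv := hLa _ ht
          have hcast : (((-d - 1).toNat : Int)) = -d - 1 := by omega
          rw [hcast] at hv
          nlinarith [hv]
        · have hj : (d - 1).toNat < (N - (idx + 1)).toNat := by omega
          have hv := hRa _ hj
          have hcast : (((d - 1).toNat : Int)) = d - 1 := by omega
          rw [hcast] at hv
          nlinarith [hv]
      · intro h
        constructor
        · intro t ht
          have hb := h (-((t : Int) + 1)) ⟨⟨by omega, by omega⟩, by omega⟩
          nlinarith [hb]
        · intro j hj
          have hb := h ((j : Int) + 1) ⟨⟨by omega, by omega⟩, by omega⟩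
          nlinarith [hb]
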